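-- pv_equiv track=rewrite | github.com/MrBrantCode/unitest_baseline | mut_generate/mist_train_cf/cf_34587/solution.py | encode_and_map_data
-- ===== SOURCE A (Python) =====
-- from typing import Dict, List
--
-- def encode_and_map_data(data: Dict[str, int], encoding_style: str, constants: List[int]) -> List[str]:
--     encoded_data = data.copy()
--     for op, constant in zip(encoding_style, constants):
--         if op == 'A':
--             encoded_data = {key: value + constant for key, value in encoded_data.items()}
--         elif op == 'M':
--             encoded_data = {key: value * constant for key, value in encoded_data.items()}
--         elif op == 'S':
--             encoded_data = {key: value - constant for key, value in encoded_data.items()}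
--
--     mapped_data = [f"{key}:{value}" for key, value in encoded_data.items()]
--     return mapped_data
-- ===== SOURCE B (Python) =====
-- from typing import Dict, List
--
-- def encode_and_map_data(data: Dict[str, int], encoding_style: str, constants: List[int]) -> List[str]:
--     # Compose the op sequence back-to-front into one affine map v -> a*v + b
--     # (state (a, b) is the composition of the suffix already processed),
--     # then render each entry once with an accumulator loop.
--     a, b = 1, 0
--     for op, c in reversed(list(zip(encoding_style, constants))):
--         if op == 'A':
--             b = a * c + b
--         elif op == 'M':
--             a = a * c
--         elif op == 'S':
--             b = b - a * c
--     out = []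
--     for key, value in data.items():
--         out.append(key + ":" + str(a * value + b))
--     return out
-- ===== Notes on version B (the rewrite author's own statement) =====
-- stated objective: alternative
-- what changed: B composes the A/M/S operation sequence back-to-front into a single affine transform a*v+b and renders each entry once with an accumulator loop, instead of rebuilding the whole dict once per operation.
import Mathlib
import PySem

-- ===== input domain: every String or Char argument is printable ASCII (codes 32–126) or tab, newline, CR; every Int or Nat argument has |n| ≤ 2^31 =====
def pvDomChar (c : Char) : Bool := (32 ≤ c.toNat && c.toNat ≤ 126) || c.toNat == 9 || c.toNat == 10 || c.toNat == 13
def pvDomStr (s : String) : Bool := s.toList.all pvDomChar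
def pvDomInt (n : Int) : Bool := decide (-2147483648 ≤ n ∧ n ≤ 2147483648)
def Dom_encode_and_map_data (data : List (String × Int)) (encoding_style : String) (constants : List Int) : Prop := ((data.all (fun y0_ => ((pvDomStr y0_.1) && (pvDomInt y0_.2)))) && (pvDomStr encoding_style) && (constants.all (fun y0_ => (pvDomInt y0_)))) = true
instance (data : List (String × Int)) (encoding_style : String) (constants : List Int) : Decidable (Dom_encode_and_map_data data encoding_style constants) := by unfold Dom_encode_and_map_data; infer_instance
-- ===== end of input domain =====

-- B recursively composes the A/M/S op sequence into one affine transform a*v+b and renders each entry once, instead of rebuilding the dict per operation.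


-- ===== PORT A =====
-- one iteration of A's loop: rebuild the whole dict with the op applied to every value
def pyAStep (d : List (String × Int)) (p : Char × Int) : List (String × Int) :=
  if p.1 = 'A' then d.map (fun kv => (kv.1, kv.2 + p.2))
  else if p.1 = 'M' then d.map (fun kv => (kv.1, kv.2 * p.2))
  else if p.1 = 'S' then d.map (fun kv => (kv.1, kv.2 - p.2))
  else d

def encode_and_map_data (data : List (String × Int)) (encoding_style : String) (constants : List Int) : List String :=
  ((encoding_style.toList.zip constants).foldl pyAStep data).map
    (fun kv => kv.1 ++ ":" ++ PySem.Int.toStr kv.2)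

-- ===== PORT B =====
-- B's state update: extend the already-composed suffix affine (a, b) by one earlier op
def altStep (ab : Int × Int) (p : Char × Int) : Int × Int :=
  if p.1 = 'A' then (ab.1, ab.1 * p.2 + ab.2)
  else if p.1 = 'M' then (ab.1 * p.2, ab.2)
  else if p.1 = 'S' then (ab.1, ab.2 - ab.1 * p.2)
  else ab

-- B's output loop: render each entry once, appending to an accumulator
def altRender (a b : Int) : List (String × Int) → List String → List String
  | [], acc => acc
  | (k, v) :: rest, acc => altRender a b rest (acc ++ [k ++ ":" ++ PySem.Int.toStr (a * v + b)])

def encode_and_map_data_alt (data : List (String × Int)) (encoding_style : String) (constants : List Int) : List String :=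
  match ((encoding_style.toList.zip constants).reverse).foldl altStep (1, 0) with
  | (a, b) => altRender a b data []

-- ===== PRECONDITION & SPEC =====
def Spec_encode_and_map_data (data : List (String × Int)) (encoding_style : String) (constants : List Int) (out : List String) : Prop := out = encode_and_map_data_alt data encoding_style constants
instance (data : List (String × Int)) (encoding_style : String) (constants : List Int) (out : List String) : Decidable (Spec_encode_and_map_data data encoding_style constants out) := by unfold Spec_encode_and_map_data; infer_instance

-- ===== CLAIM =====
def Claim_equal_encode_and_map_data : Prop := ∀ (data : List (String × Int)) (encoding_style : String) (constants : List Int), Dom_encode_and_map_data data encoding_style constants → Spec_encode_and_map_data data encoding_style constants (encode_and_map_data data encoding_style constants)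

-- ===== LEMMAS AND PROOFS =====

-- A's repeated dict-rebuild loop replaces every value by the affine image of B's back-to-front composed coefficients.
lemma foldl_pyAStep_foldr (ops : List (Char × Int)) :
    ∀ (d : List (String × Int)),
      ops.foldl pyAStep d =
      d.map (fun kv => (kv.1,
        (ops.foldr (fun p ab => altStep ab p) (1, 0)).1 * kv.2 +
        (ops.foldr (fun p ab => altStep ab p) (1, 0)).2)) := by
  induction ops with
  | nil => intro d; simp
  | cons p ops ih =>
    intro d
    obtain ⟨op, c⟩ := p
    simp only [List.foldl_cons, List.foldr_cons]
    rw [ih]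
    by_cases hA : op = 'A'
    · simp [pyAStep, altStep, hA, List.map_map, Function.comp_def]
      intro _ _ _; ring
    · by_cases hM : op = 'M'
      · simp [pyAStep, altStep, hM, List.map_map, Function.comp_def]
        intro _ _ _; ring
      · by_cases hS : op = 'S'
        · simp [pyAStep, altStep, hS, List.map_map, Function.comp_def]
          intro _ _ _; ring
        · simp [pyAStep, altStep, hA, hM, hS]

-- B's accumulator loop renders exactly the map over entries.
lemma altRender_eq_map (a b : Int) :
    ∀ (d : List (String × Int)) (acc : List String),
      altRender a b d acc = acc ++ d.map (fun kv => kv.1 ++ ":" ++ PySem.Int.toStr (a * kv.2 + b)) := by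
  intro d
  induction d with
  | nil => intro acc; simp [altRender]
  | cons kv rest ih => intro acc; obtain ⟨k, v⟩ := kv; simp [altRender, ih]

-- ===== VERDICT =====
theorem encode_and_map_data_spec : Claim_equal_encode_and_map_data := by
  intro data encoding_style constants _
  unfold Spec_encode_and_map_data encode_and_map_data encode_and_map_data_alt
  rw [foldl_pyAStep_foldr, List.foldl_reverse]
  simp [altRender_eq_map, List.map_map, Function.comp_def]
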